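-- pv_equiv track=rewrite | github.com/clovesnascimento/cngsmkosmos | patch_llm_client.py | find_target_line
-- ===== SOURCE A (Python) =====
-- def find_target_line(lines):
--     """Encontra 'content = self.chat(' dentro de generate_proposal."""
--     in_fn = False
--     for i, line in enumerate(lines):
--         if "def generate_proposal(" in line:
--             in_fn = True
--         if in_fn and "content = self.chat(" in line:
--             return i
--         if in_fn and i > 0 and line.strip().startswith("def ") and "generate_proposal" not in line:
--             break
--     return -1
-- ===== SOURCE B (Python) =====
-- def find_target_line(lines):
--     """Encontra 'content = self.chat(' dentro de generate_proposal."""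
--     # phase 1: locate the start of the generate_proposal block
--     start = next((i for i, l in enumerate(lines)
--                   if "def generate_proposal(" in l), None)
--     if start is None:
--         return -1
--     # phase 2: locate the end of the block = first following unrelated def line
--     # (that boundary line itself is still searched, as A tests the target before breaking)
--     end = len(lines) - 1
--     for j in range(start + 1, len(lines)):
--         if lines[j].strip().startswith("def ") and "generate_proposal" not in lines[j]:
--             end = j
--             break
--     # phase 3: search the block for the target
--     for k in range(start, end + 1):
--         if "content = self.chat(" in lines[k]:
--             return k
--     return -1
-- ===== Notes on version B (the rewrite author's own statement) =====
-- stated objective: simpler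
-- what changed: Replaces A's single stateful scan (in_fn flag with mid-loop break) by three stateless passes: find the block start, find the block end, then search that index range for the target.
import Mathlib
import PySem

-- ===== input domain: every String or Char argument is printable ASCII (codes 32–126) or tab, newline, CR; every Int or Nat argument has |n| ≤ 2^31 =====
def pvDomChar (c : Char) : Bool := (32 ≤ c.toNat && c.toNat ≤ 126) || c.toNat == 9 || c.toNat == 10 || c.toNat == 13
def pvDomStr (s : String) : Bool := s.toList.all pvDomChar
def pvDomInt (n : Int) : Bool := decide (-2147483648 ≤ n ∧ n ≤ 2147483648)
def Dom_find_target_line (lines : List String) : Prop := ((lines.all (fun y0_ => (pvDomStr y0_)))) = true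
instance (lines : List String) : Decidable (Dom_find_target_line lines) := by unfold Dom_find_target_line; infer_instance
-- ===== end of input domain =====

-- B replaces A's single stateful scan (in_fn flag + mid-loop break) with three stateless
-- passes (find block start, find block end, search the range); objective: simpler.

-- the three literal membership/boundary tests both Pythons write out
def hasGP (l : String) : Bool := PySem.Str.isIn "def generate_proposal(" l
def hasTarget (l : String) : Bool := PySem.Str.isIn "content = self.chat(" l
def isBoundary (l : String) : Bool :=
  PySem.Str.startswith (PySem.Str.strip l) "def " && !(PySem.Str.isIn "generate_proposal" l)

-- ===== PORT A =====
-- A's loop: i = current index, in_fn = flag, scanning the remaining lines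
def aGo (i : Nat) (in_fn : Bool) : List String → Int
  | [] => -1
  | l :: rest =>
    let in_fn' := if hasGP l then true else in_fn
    if in_fn' && hasTarget l then (i : Int)
    else if in_fn' && decide (0 < i) && isBoundary l then -1
    else aGo (i + 1) in_fn' rest

def find_target_line (lines : List String) : Int := aGo 0 false lines

-- ===== PORT B =====
-- phase 1: 'next((i for i, l in enumerate(lines) if "def generate_proposal(" in l), None)'
def bStart (i : Nat) : List String → Option Nat
  | [] => none
  | l :: rest => if hasGP l then some i else bStart (i + 1) rest

-- phase 2: 'for j in range(start+1, len(lines)): if <boundary>: end = j; break'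
-- ported as a scan over the suffix lines[start+1:] carrying the absolute index j
def bEnd (j : Nat) : List String → Option Nat
  | [] => none
  | l :: rest => if isBoundary l then some j else bEnd (j + 1) rest

-- phase 3: 'for k in range(start, end+1): if target in lines[k]: return k' — a scan over
-- the suffix lines[start:] carrying the absolute index k, stopping once k exceeds stop
def bFind (k stop : Nat) : List String → Int
  | [] => -1
  | l :: rest => if stop < k then -1
                 else if hasTarget l then (k : Int)
                 else bFind (k + 1) stop rest

def find_target_line_alt (lines : List String) : Int :=
  match bStart 0 lines with
  | none => -1
  | some start =>
    let stop := (bEnd (start + 1) (lines.drop (start + 1))).getD (lines.length - 1)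
    bFind start stop (lines.drop start)

-- ===== PRECONDITION & SPEC =====
def Spec_find_target_line (lines : List String) (out : Int) : Prop := out = find_target_line_alt lines
instance (lines : List String) (out : Int) : Decidable (Spec_find_target_line lines out) := by unfold Spec_find_target_line; infer_instance

-- ===== CLAIM (what is proved, stated in full; the proofs are below) =====
def Claim_equal_find_target_line : Prop := ∀ (lines : List String), Dom_find_target_line lines → Spec_find_target_line lines (find_target_line lines)

-- ===== LEMMAS AND PROOFS =====

-- a line containing "def generate_proposal(" contains "generate_proposal", so it is no boundary
lemma isBoundary_false_of_hasGP (l : String) (h : hasGP l = true) : isBoundary l = false := by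
  have h' : PySem.Str.isIn "def generate_proposal(" l = true := h
  have hin : PySem.Str.isIn "generate_proposal" l = true := by
    rw [PySem.Str.isIn_iff_infix] at h' ⊢
    exact List.IsInfix.trans (by decide) h'
  unfold isBoundary
  rw [hin]
  simp

lemma bEnd_ge (rest : List String) (j m : Nat) (h : bEnd j rest = some m) : j ≤ m := by
  induction rest generalizing j with
  | nil => simp [bEnd] at h
  | cons l rest ih =>
    simp only [bEnd] at h
    split at h
    · cases h; omega
    · exact Nat.le_of_succ_le (ih (j + 1) h)

lemma bStart_ge (rest : List String) (i s : Nat) (h : bStart i rest = some s) : i ≤ s := by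
  induction rest generalizing i with
  | nil => simp [bStart] at h
  | cons l rest ih =>
    simp only [bStart] at h
    split at h
    · cases h; omega
    · exact Nat.le_of_succ_le (ih (i + 1) h)

lemma bFind_stop_lt (rest : List String) (k stop : Nat) (h : stop < k) :
    bFind k stop rest = -1 := by
  cases rest with
  | nil => rfl
  | cons l rest => simp [bFind, h]

lemma stop_ge (rest : List String) (i d : Nat) (hd : i ≤ d) : i ≤ (bEnd i rest).getD d := by
  cases h : bEnd i rest with
  | none => simpa using hd
  | some m => simpa using bEnd_ge rest i m h

-- in-function phase: A's loop with in_fn = true equals B's bounded search, the bound being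
-- the first boundary in the current suffix (default: the absolute index of the last line)
lemma aGo_true (rest : List String) (i : Nat) (hi : 1 ≤ i) :
    aGo i true rest = bFind i ((bEnd i rest).getD (i + rest.length - 1)) rest := by
  induction rest generalizing i with
  | nil => rfl
  | cons l rest ih =>
    by_cases ht : hasTarget l = true
    · have hstop0 : i ≤ (bEnd i (l :: rest)).getD (i + (l :: rest).length - 1) :=
        stop_ge _ _ _ (by simp only [List.length_cons]; omega)
      have hA : aGo i true (l :: rest) = (i : Int) := by simp [aGo, ht]
      have hB : bFind i ((bEnd i (l :: rest)).getD (i + (l :: rest).length - 1)) (l :: rest)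
          = (i : Int) := by
        simp only [bFind]
        rw [if_neg (by omega), if_pos ht]
      rw [hA, hB]
    · by_cases hb : isBoundary l = true
      · have h0 : 0 < i := by omega
        have hbe : bEnd i (l :: rest) = some i := by simp [bEnd, hb]
        have hA : aGo i true (l :: rest) = -1 := by simp [aGo, ht, hb, h0]
        have hB : bFind i i (l :: rest) = -1 := by
          simp only [bFind]
          rw [if_neg (by omega), if_neg ht, bFind_stop_lt rest (i + 1) i (by omega)]
        rw [hA, hbe]
        simp only [Option.getD_some]
        exact hB.symm
      · have hbe : bEnd i (l :: rest) = bEnd (i + 1) rest := by simp [bEnd, hb]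
        have hd : i + (l :: rest).length - 1 = (i + 1) + rest.length - 1 := by
          simp only [List.length_cons]; omega
        have hstop0 : i ≤ (bEnd i (l :: rest)).getD (i + (l :: rest).length - 1) :=
          stop_ge _ _ _ (by simp only [List.length_cons]; omega)
        have hA : aGo i true (l :: rest) = aGo (i + 1) true rest := by simp [aGo, ht, hb]
        have hB : bFind i ((bEnd i (l :: rest)).getD (i + (l :: rest).length - 1)) (l :: rest)
            = bFind (i + 1) ((bEnd i (l :: rest)).getD (i + (l :: rest).length - 1)) rest := by
          simp only [bFind]
          rw [if_neg (by omega), if_neg ht]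
        rw [hA, hB, ih (i + 1) (by omega), hbe, hd]

-- searching phase: A's loop with in_fn = false equals B's three-phase plan on the suffix
lemma aGo_false (rest : List String) (i : Nat) :
    aGo i false rest =
      match bStart i rest with
      | none => -1
      | some s =>
        bFind s ((bEnd (s + 1) (rest.drop (s + 1 - i))).getD (i + rest.length - 1))
          (rest.drop (s - i)) := by
  induction rest generalizing i with
  | nil => rfl
  | cons l rest ih =>
    by_cases hg : hasGP l = true
    · have hnb : isBoundary l = false := isBoundary_false_of_hasGP l hg
      have hbs : bStart i (l :: rest) = some i := by simp [bStart, hg]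
      rw [hbs]
      have e0 : i - i = 0 := by omega
      have e1 : i + 1 - i = 1 := by omega
      simp only [e0, e1, List.drop_zero, List.drop_succ_cons]
      have hstop : i ≤ (bEnd (i + 1) rest).getD (i + (l :: rest).length - 1) := by
        cases h : bEnd (i + 1) rest with
        | none => simp only [Option.getD_none, List.length_cons]; omega
        | some m =>
          have := bEnd_ge _ _ _ h
          simp only [Option.getD_some]; omega
      by_cases ht : hasTarget l = true
      · have hA : aGo i false (l :: rest) = (i : Int) := by simp [aGo, hg, ht]
        have hB : bFind i ((bEnd (i + 1) rest).getD (i + (l :: rest).length - 1)) (l :: rest)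
            = (i : Int) := by
          simp only [bFind]
          rw [if_neg (by omega), if_pos ht]
        rw [hA, hB]
      · have hd : (i + 1) + rest.length - 1 = i + (l :: rest).length - 1 := by
          simp only [List.length_cons]; omega
        have hA : aGo i false (l :: rest) = aGo (i + 1) true rest := by
          simp [aGo, hg, ht, hnb]
        have hB : bFind i ((bEnd (i + 1) rest).getD (i + (l :: rest).length - 1)) (l :: rest)
            = bFind (i + 1) ((bEnd (i + 1) rest).getD (i + (l :: rest).length - 1)) rest := by
          simp only [bFind]
          rw [if_neg (by omega), if_neg ht]
        rw [hA, hB, aGo_true rest (i + 1) (by omega), hd]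
    · have hg' : hasGP l = false := by simpa using hg
      have hbs : bStart i (l :: rest) = bStart (i + 1) rest := by simp [bStart, hg']
      rw [hbs]
      have hlhs : aGo i false (l :: rest) = aGo (i + 1) false rest := by simp [aGo, hg']
      rw [hlhs, ih (i + 1)]
      cases h : bStart (i + 1) rest with
      | none => rfl
      | some s =>
        have hs : i + 1 ≤ s := bStart_ge _ _ _ h
        have h1 : rest.drop (s + 1 - (i + 1)) = (l :: rest).drop (s + 1 - i) := by
          have e : s + 1 - i = (s + 1 - (i + 1)) + 1 := by omega
          simp [e]
        have h2 : rest.drop (s - (i + 1)) = (l :: rest).drop (s - i) := by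
          have e : s - i = (s - (i + 1)) + 1 := by omega
          simp [e]
        have h3 : (i + 1) + rest.length - 1 = i + (l :: rest).length - 1 := by
          simp only [List.length_cons]; omega
        simp only [h1, h2, h3]

-- ===== VERDICT (by name: the statement is the Claim_ definition above) =====
theorem find_target_line_spec : Claim_equal_find_target_line := by
  intro lines _
  show find_target_line lines = find_target_line_alt lines
  unfold find_target_line find_target_line_alt
  rw [aGo_false lines 0]
  cases h : bStart 0 lines with
  | none => rfl
  | some s => simp
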